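-- pv_equiv track=rewrite | github.com/tylermontell/magic_machine | test/portfolio_parser.py | combine_portfolio_and_data
-- ===== SOURCE A (Python) =====
-- def detect_portfolio_name(row):
--     for cell in row:
--         if cell.startswith("G ") or cell.startswith("Meridian"):
--             return cell
--     return None
--
-- def combine_portfolio_and_data(rows):
--     combined_rows = []
--     skip_next = False
--
--     for idx, row in enumerate(rows):
--         if not skip_next:
--             portfolio_name = detect_portfolio_name(row)
--             if portfolio_name and idx + 1 < len(rows):
--                 combined_row = [portfolio_name] + rows[idx + 1][1:]
--                 combined_rows.append(combined_row)
--                 skip_next = True  # Skip the next row as it's been merged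
--             else:
--                 combined_rows.append(row)
--         else:
--             skip_next = False  # Reset skip
--     return combined_rows
-- ===== SOURCE B (Python) =====
-- def detect_portfolio_name(row):
--     return next((c for c in row if c.startswith(("G ", "Meridian"))), None)
--
-- def combine_portfolio_and_data(rows):
--     stack = rows[::-1]
--     out = []
--     while stack:
--         row = stack.pop()
--         name = detect_portfolio_name(row)
--         if name and stack:
--             out.append([name] + stack.pop()[1:])
--         else:
--             out.append(row)
--     return out
-- ===== Notes on version B (the rewrite author's own statement) =====
-- stated objective: alternative
-- what changed: Replaced the enumerate-with-skip_next-flag state machine (with its index lookup rows[idx+1] and no-op skip iterations) by a destructive stack consumption: the rows are reversed once into a stack that is popped, with a second pop consuming the data row on a merge, and the cell detector is a generator/next one-liner instead of an explicit scan loop.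
import Mathlib
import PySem

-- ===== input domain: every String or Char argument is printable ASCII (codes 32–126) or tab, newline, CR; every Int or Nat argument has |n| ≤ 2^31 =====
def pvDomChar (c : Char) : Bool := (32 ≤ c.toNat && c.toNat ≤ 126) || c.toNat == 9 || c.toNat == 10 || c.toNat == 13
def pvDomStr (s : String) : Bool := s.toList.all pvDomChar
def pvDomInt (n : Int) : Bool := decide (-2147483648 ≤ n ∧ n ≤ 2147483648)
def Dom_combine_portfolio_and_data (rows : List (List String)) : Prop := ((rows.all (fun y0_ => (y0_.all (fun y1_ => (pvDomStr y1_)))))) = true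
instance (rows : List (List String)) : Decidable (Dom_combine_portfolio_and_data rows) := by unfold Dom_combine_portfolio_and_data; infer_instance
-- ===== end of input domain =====

-- B replaces A's enumerate-with-skip-flag state machine by a destructive stack
-- consumption (rows reversed once, then popped, two pops per merge) with a
-- find?-based detector; return values are proved equal on all inputs.

-- ===== PORT A =====
-- A's recursive-scan helper detect_portfolio_name
def detect_portfolio_name (row : List String) : Option String :=
  match row with
  | [] => none
  | cell :: rest =>
      if PySem.Str.startswith cell "G " || PySem.Str.startswith cell "Meridian" then some cell
      else detect_portfolio_name rest

-- A's for loop over enumerate(rows) with state (combined_rows, skip_next)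
def pvALoop (rows : List (List String)) :
    List (Int × List String) → List (List String) → Bool → List (List String)
  | [], combined_rows, _ => combined_rows
  | (idx, row) :: rest, combined_rows, skip_next =>
      if skip_next then
        pvALoop rows rest combined_rows false
      else
        match detect_portfolio_name row with
        | some portfolio_name =>
            -- 'if portfolio_name and idx + 1 < len(rows)': truthy string and bound
            if portfolio_name ≠ "" ∧ idx + 1 < (rows.length : Int) then
              pvALoop rows rest
                (combined_rows ++ [[portfolio_name] ++ ((PySem.List.pyGet? rows (idx + 1)).getD []).drop 1])
                true
            else pvALoop rows rest (combined_rows ++ [row]) false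
        | none => pvALoop rows rest (combined_rows ++ [row]) false

def combine_portfolio_and_data (rows : List (List String)) : List (List String) :=
  pvALoop rows (PySem.List.enumerate rows 0) [] false

-- ===== PORT B =====
-- B's detector: next((c for c in row if c.startswith(("G ", "Meridian"))), None)
def detect_portfolio_name_alt (row : List String) : Option String :=
  row.find? (fun c => PySem.Str.startswith c "G " || PySem.Str.startswith c "Meridian")

-- B's while loop popping from the stack (Python list.pop() = PySem.List.pop?, default -1).
-- The Nat argument is fuel, a pure totality guard: it starts at the stack's length and
-- each iteration pops at least one element, so it never runs out.
def pvBLoop : Nat → List (List String) → List (List String) → List (List String)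
  | 0, _, out => out
  | fuel + 1, stack, out =>
      match PySem.List.pop? stack with
      | none => out                                  -- while-condition false: stack empty
      | some (row, stack') =>
          match detect_portfolio_name_alt row with
          | some name =>
              if name ≠ "" ∧ stack' ≠ [] then        -- 'if name and stack:'
                match PySem.List.pop? stack' with
                | none => out                        -- unreachable (stack' ≠ []); totality guard only
                | some (nxt, stack'') => pvBLoop fuel stack'' (out ++ [[name] ++ nxt.drop 1])
              else pvBLoop fuel stack' (out ++ [row])
          | none => pvBLoop fuel stack' (out ++ [row])

def combine_portfolio_and_data_alt (rows : List (List String)) : List (List String) :=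
  pvBLoop rows.length ((PySem.List.slice? rows none none (-1)).getD []) []   -- stack = rows[::-1]

-- ===== PRECONDITION & SPEC =====
def Spec_combine_portfolio_and_data (rows : List (List String)) (out : List (List String)) : Prop := out = combine_portfolio_and_data_alt rows
instance (rows : List (List String)) (out : List (List String)) : Decidable (Spec_combine_portfolio_and_data rows out) := by unfold Spec_combine_portfolio_and_data; infer_instance

-- ===== CLAIM (what is proved, stated in full; the proofs are below) =====
def Claim_equal_combine_portfolio_and_data : Prop := ∀ (rows : List (List String)), Dom_combine_portfolio_and_data rows → Spec_combine_portfolio_and_data rows (combine_portfolio_and_data rows)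

-- ===== LEMMAS AND PROOFS =====

-- the common mathematical shape both loops compute: front recursion consuming 1 or 2 rows
def pvG : List (List String) → List (List String)
  | [] => []
  | [row] =>
      match detect_portfolio_name_alt row with
      | some _ => [row]
      | none => [row]
  | row :: nxt :: rest' =>
      match detect_portfolio_name_alt row with
      | some name =>
          if name ≠ "" then ([name] ++ nxt.drop 1) :: pvG rest'
          else row :: pvG (nxt :: rest')
      | none => row :: pvG (nxt :: rest')

theorem detect_eq (row : List String) :
    detect_portfolio_name row = detect_portfolio_name_alt row := by
  induction row with
  | nil => rfl
  | cons cell rest ih =>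
    rw [detect_portfolio_name, detect_portfolio_name_alt, List.find?_cons]
    cases hb : (PySem.Str.startswith cell "G " || PySem.Str.startswith cell "Meridian") with
    | true => simp
    | false => simp [ih, detect_portfolio_name_alt]

theorem pvG_single (row : List String) : pvG [row] = [row] := by
  rw [pvG]
  cases detect_portfolio_name_alt row <;> rfl

theorem pop?_nil_str : PySem.List.pop? ([] : List (List String)) = none := by
  simp [PySem.List.pop?, PySem.List.pyIdx?]

theorem pvBLoop_nil (fuel : Nat) (out : List (List String)) : pvBLoop fuel [] out = out := by
  cases fuel with
  | zero => rfl
  | succ n => simp [pvBLoop, pop?_nil_str]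

-- B's stack loop on xs.reverse with enough fuel is pvG xs appended to the accumulator
theorem pvBLoop_eq_pvG :
    ∀ (fuel : Nat) (xs : List (List String)), xs.length ≤ fuel →
      ∀ (out : List (List String)), pvBLoop fuel xs.reverse out = out ++ pvG xs := by
  intro fuel
  induction fuel with
  | zero =>
    intro xs hlen out
    match xs, hlen with
    | [], _ => simp [pvBLoop, pvG]
  | succ n ih =>
    intro xs hlen out
    match xs, hlen with
    | [], _ => simp [pvBLoop_nil, pvG]
    | [row], _ =>
      have hpop : PySem.List.pop? ([row] : List (List String)).reverse = some (row, []) := by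
        simpa using PySem.List.pop?_last ([] : List (List String)) row
      rw [pvBLoop]
      simp only [hpop, pvG_single]
      cases detect_portfolio_name_alt row with
      | none => simp [pvBLoop_nil]
      | some name => simp [pvBLoop_nil]
    | row :: nxt :: rest', hlen =>
      have hpop : PySem.List.pop? ((row :: nxt :: rest').reverse) = some (row, (nxt :: rest').reverse) := by
        rw [List.reverse_cons]; exact PySem.List.pop?_last _ _
      rw [pvBLoop, pvG]
      simp only [hpop]
      cases hdet : detect_portfolio_name_alt row with
      | none =>
        have := ih (nxt :: rest') (by simpa using Nat.le_of_succ_le_succ hlen) (out ++ [row])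
        simpa using this
      | some name =>
        by_cases hname : name ≠ ""
        · have hcond : name ≠ "" ∧ (nxt :: rest').reverse ≠ [] := by simp [hname]
          have hpop2 : PySem.List.pop? ((nxt :: rest').reverse) = some (nxt, rest'.reverse) := by
            rw [List.reverse_cons]; exact PySem.List.pop?_last _ _
          simp only [if_pos hcond, hpop2, if_pos hname]
          have hn : rest'.length ≤ n := by simp at hlen ⊢; omega
          cases n with
          | zero => simp at hn; subst hn; simp [pvBLoop_nil, pvG]
          | succ m =>
            have := ih rest' (by omega) (out ++ [[name] ++ nxt.drop 1])
            simpa using this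
        · have hcond : ¬ (name ≠ "" ∧ (nxt :: rest').reverse ≠ []) := fun h => hname h.1
          simp only [if_neg hcond, if_neg hname]
          have := ih (nxt :: rest') (by simpa using Nat.le_of_succ_le_succ hlen) (out ++ [row])
          simpa using this

-- A's loop from position i (skip_next = false) produces acc ++ pvG of the remaining rows
theorem pvALoop_eq_pvG (rows : List (List String)) :
    ∀ (tail : List (List String)) (i : Nat) (acc : List (List String)),
      rows.drop i = tail →
      pvALoop rows (PySem.List.enumerate tail (i : Int)) acc false = acc ++ pvG tail := by
  suffices H : ∀ (n : Nat) (tail : List (List String)), tail.length ≤ n →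
      ∀ (i : Nat) (acc : List (List String)), rows.drop i = tail →
      pvALoop rows (PySem.List.enumerate tail (i : Int)) acc false = acc ++ pvG tail by
    exact fun tail => H tail.length tail le_rfl
  intro n
  induction n with
  | zero =>
    intro tail hlen i acc hdrop
    match tail, hlen, hdrop with
    | [], _, _ => simp [PySem.List.enumerate, pvALoop, pvG]
  | succ n ih =>
    intro tail hlen i acc hdrop
    match tail, hlen, hdrop with
    | [], _, _ => simp [PySem.List.enumerate, pvALoop, pvG]
    | [row], _, hdrop =>
      have hlast : ¬ ((i : Int) + 1 < (rows.length : Int)) := by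
        have h1 : (rows.drop i).drop 1 = [] := by rw [hdrop]; rfl
        rw [List.drop_drop] at h1
        have h2 := List.drop_eq_nil_iff.mp h1
        have h3 : i < rows.length := by
          by_contra h
          simp [List.drop_eq_nil_of_le (Nat.le_of_not_lt h)] at hdrop
        exact_mod_cast by omega
      rw [PySem.List.enumerate_cons, pvG_single]
      cases hdet : detect_portfolio_name_alt row with
      | none =>
        have hdetA : detect_portfolio_name row = none := by rw [detect_eq, hdet]
        simp [pvALoop, hdetA, PySem.List.enumerate]
      | some name =>
        have hdetA : detect_portfolio_name row = some name := by rw [detect_eq, hdet]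
        simp [pvALoop, hdetA, PySem.List.enumerate, hlast]
    | row :: row' :: rest', hlen, hdrop =>
      have hi : i < rows.length := by
        by_contra h
        simp [List.drop_eq_nil_of_le (Nat.le_of_not_lt h)] at hdrop
      have hrest : rows.drop (i + 1) = row' :: rest' := by
        have h1 : (rows.drop i).drop 1 = row' :: rest' := by rw [hdrop]; rfl
        rw [List.drop_drop] at h1; exact h1
      have hi1 : i + 1 < rows.length := by
        by_contra h
        simp [List.drop_eq_nil_of_le (Nat.le_of_not_lt h)] at hrest
      have hget : PySem.List.pyGet? rows ((i : Int) + 1) = some row' := by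
        rw [show ((i : Int) + 1) = ((i + 1 : Nat) : Int) by push_cast; ring,
          PySem.List.pyGet?_natCast]
        have h0 : rows[i + 1]? = some row' := by
          have : (rows.drop (i + 1))[0]? = some row' := by rw [hrest]; rfl
          rwa [List.getElem?_drop, Nat.add_zero] at this
        simp [h0]
      have hrest' : rows.drop (i + 2) = rest' := by
        have h1 : (rows.drop (i + 1)).drop 1 = rest' := by rw [hrest]; rfl
        rw [List.drop_drop] at h1
        rw [show i + 2 = i + 1 + 1 from by omega]
        exact h1
      rw [PySem.List.enumerate_cons, pvG]
      cases hdet : detect_portfolio_name_alt row with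
      | none =>
        have hdetA : detect_portfolio_name row = none := by rw [detect_eq, hdet]
        simp only [pvALoop, hdetA]
        have := ih (row' :: rest') (by simpa using Nat.le_of_succ_le_succ hlen)
          (i + 1) (acc ++ [row]) hrest
        push_cast at this
        simpa using this
      | some name =>
        have hdetA : detect_portfolio_name row = some name := by rw [detect_eq, hdet]
        simp only [pvALoop, hdetA]
        by_cases hname : name ≠ ""
        · have hcond : name ≠ "" ∧ (i : Int) + 1 < (rows.length : Int) :=
            ⟨hname, by exact_mod_cast hi1⟩
          rw [if_pos hcond, PySem.List.enumerate_cons, if_pos hname]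
          simp only [hget, Option.getD_some]
          rw [pvALoop]
          have := ih rest' (by simp at hlen ⊢; omega) (i + 2)
            (acc ++ [[name] ++ row'.drop 1]) hrest'
          push_cast at this
          simpa using this
        · have hcond : ¬ (name ≠ "" ∧ (i : Int) + 1 < (rows.length : Int)) :=
            fun h => hname h.1
          rw [if_neg hcond, if_neg hname]
          have := ih (row' :: rest') (by simpa using Nat.le_of_succ_le_succ hlen)
            (i + 1) (acc ++ [row]) hrest
          push_cast at this
          simpa using this

-- ===== VERDICT (by name: the statement is the Claim_ definition above) =====
theorem combine_portfolio_and_data_spec : Claim_equal_combine_portfolio_and_data := by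
  intro rows _
  show combine_portfolio_and_data rows = combine_portfolio_and_data_alt rows
  unfold combine_portfolio_and_data combine_portfolio_and_data_alt
  rw [PySem.List.slice?_none_none_neg_one, Option.getD_some,
    pvBLoop_eq_pvG rows.length rows le_rfl []]
  simpa using pvALoop_eq_pvG rows rows 0 [] rfl
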